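-- pv_equiv track=rewrite | github.com/chrisabbeytx/central-park-walk | convert_to_godot.py | _build_string_index
-- ===== SOURCE A (Python) =====
-- def _build_string_index(values):
--     """Return (table: list[str], indices: list[int]) for a list of string values."""
--     table = []
--     lookup = {}
--     indices = []
--     for v in values:
--         s = str(v) if v else ""
--         if s not in lookup:
--             lookup[s] = len(table)
--             table.append(s)
--         indices.append(lookup[s])
--     return table, indices
-- ===== SOURCE B (Python) =====
-- def _build_string_index(values):
--     """Return (table: list[str], indices: list[int]) for a list of string values."""
--     normalized = [str(v) if v else "" for v in values]
--     # first[i] = position of the first occurrence of normalized[i]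
--     first = [normalized.index(s) for s in normalized]
--     # distinct first-occurrence positions in increasing order = first-occurrence order
--     firsts = sorted(set(first))
--     table = [normalized[j] for j in firsts]
--     rank = [0] * len(normalized)
--     for r, j in enumerate(firsts):
--         rank[j] = r
--     indices = [rank[j] for j in first]
--     return table, indices
-- ===== Notes on version B (the rewrite author's own statement) =====
-- stated objective: alternative
-- what changed: A deduplicates incrementally with one loop carrying table/lookup/indices; B instead computes each element's first-occurrence position with list.index, takes the sorted set of those positions as the table's positions, reads the table off the input positionally, and resolves indices through a rank array indexed by position - no dict and no incremental table.
import Mathlib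
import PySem

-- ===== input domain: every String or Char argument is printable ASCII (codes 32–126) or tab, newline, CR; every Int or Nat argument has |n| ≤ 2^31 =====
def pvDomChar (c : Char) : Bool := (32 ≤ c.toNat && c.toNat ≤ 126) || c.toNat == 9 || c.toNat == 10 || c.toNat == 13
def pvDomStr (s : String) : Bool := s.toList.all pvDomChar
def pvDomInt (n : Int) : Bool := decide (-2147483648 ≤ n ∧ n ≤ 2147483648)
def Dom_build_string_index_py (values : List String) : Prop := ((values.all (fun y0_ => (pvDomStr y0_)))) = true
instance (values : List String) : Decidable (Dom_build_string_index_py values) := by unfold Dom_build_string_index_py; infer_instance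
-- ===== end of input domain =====

-- B replaces A's interleaved dict-driven loop by a positional computation: first-occurrence positions via list.index, a sorted set of those positions, and a rank array; return value proved equal.


-- ===== PORT A =====
-- s = str(v) if v else ""  (v is already a string, so str(v) = v; falsy means the empty string)
def pvNorm (v : String) : String := if v ≠ "" then v else ""

-- one iteration of A's loop body on the already-normalized string s (state: table, lookup, indices);
-- the trailing lookup[s] can never raise KeyError (s was just inserted if absent), so getD's default is never used
def pvAStepN (acc : List String × PySem.Dict String Int × List Int) (s : String) :
    List String × PySem.Dict String Int × List Int :=
  if acc.2.1.contains s = false then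
    (acc.1 ++ [s], acc.2.1.insert s ((acc.1.length : Int)),
      acc.2.2 ++ [(acc.2.1.insert s ((acc.1.length : Int))).getD s 0])
  else
    (acc.1, acc.2.1, acc.2.2 ++ [acc.2.1.getD s 0])

def pvAStep (acc : List String × PySem.Dict String Int × List Int) (v : String) :
    List String × PySem.Dict String Int × List Int :=
  pvAStepN acc (pvNorm v)

def build_string_index_py (values : List String) : List String × List Int :=
  let st := values.foldl pvAStep ([], PySem.Dict.empty, [])
  (st.1, st.2.2)

-- ===== PORT B =====
-- first = [normalized.index(s) for s in normalized]; .index can never raise ValueError here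
-- (every s is an element of normalized), so getD's default is never used
def pvFirstList (normalized : List String) : List Int :=
  normalized.map (fun s => (((PySem.List.index? normalized s).getD 0 : Nat) : Int))

-- one iteration of the rank-filling loop: rank[j] = r for (r, j) in enumerate(firsts)
def pvRankStep (rank : List Int) (p : Int × Int) : List Int :=
  PySem.List.pySetD rank p.2 p.1

def build_string_index_py_alt (values : List String) : List String × List Int :=
  let normalized := values.map pvNorm
  let first := pvFirstList normalized
  let firsts := PySem.List.sorted (PySem.Set.ofList first) (fun x => x)
  let table := firsts.map (fun j => PySem.List.pyGetD normalized j "")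
  let rank := (PySem.List.enumerate firsts).foldl pvRankStep
      (List.replicate normalized.length (0 : Int))
  let indices := first.map (fun j => PySem.List.pyGetD rank j 0)
  (table, indices)

-- ===== PRECONDITION & SPEC =====
def Spec_build_string_index_py (values : List String) (out : List String × List Int) : Prop := out = build_string_index_py_alt values
instance (values : List String) (out : List String × List Int) : Decidable (Spec_build_string_index_py values out) := by unfold Spec_build_string_index_py; infer_instance

-- ===== CLAIM (what is proved, stated in full; the proofs are below) =====
def Claim_equal_build_string_index_py : Prop := ∀ (values : List String), Dom_build_string_index_py values → Spec_build_string_index_py values (build_string_index_py values)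

-- ===== LEMMAS AND PROOFS =====

-- normalization is the identity on strings
theorem pvNorm_id (v : String) : pvNorm v = v := by
  unfold pvNorm; split_ifs with h
  · rfl
  · exact (not_not.mp h).symm

-- canonical table: the distinct strings in first-occurrence order
def pvT (vs : List String) : List String := PySem.Set.ofList vs

-- canonical first-occurrence positions
def pvFI (vs : List String) : List Int := vs.map (fun s => ((vs.idxOf s : Nat) : Int))

-- the distinct first-occurrence positions, in order of appearance
def pvF (vs : List String) : List Int := PySem.Set.ofList (pvFI vs)

theorem pv_idxOf?_of_mem {α : Type} [BEq α] [LawfulBEq α] (xs : List α) (s : α) (h : s ∈ xs) :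
    List.idxOf? s xs = some (xs.idxOf s) := by
  induction xs with
  | nil => simp at h
  | cons a t ih =>
    by_cases hsa : a = s
    · subst hsa; simp [List.idxOf?_cons]
    · have hs : s ∈ t := by simpa [Ne.symm hsa] using h
      simp [List.idxOf?_cons, hsa, ih hs]

theorem pvFirstList_eq (vs : List String) : pvFirstList vs = pvFI vs := by
  unfold pvFirstList pvFI
  exact List.map_congr_left (fun s hs => by
    simp [PySem.List.index?, pv_idxOf?_of_mem vs s hs])

theorem pv_ofList_append_singleton {α : Type} [BEq α] (xs : List α) (x : α) :
    PySem.Set.ofList (xs ++ [x]) = PySem.Set.add (PySem.Set.ofList xs) x := by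
  simp [PySem.Set.ofList, List.foldl_append]

-- pvFI of an extended list: old positions are unchanged, the new element contributes
-- its first occurrence in the extended list
theorem pvFI_append (vs : List String) (x : String) :
    pvFI (vs ++ [x]) =
      pvFI vs ++ [if x ∈ vs then ((vs.idxOf x : Nat) : Int) else ((vs.length : Nat) : Int)] := by
  unfold pvFI
  rw [List.map_append]
  congr 1
  · exact List.map_congr_left (fun s hs => by rw [List.idxOf_append_of_mem hs])
  · by_cases hx : x ∈ vs
    · simp [hx, List.idxOf_append_of_mem hx]
    · simp [hx, List.idxOf_append]

-- main structural lemma for B: pvF is strictly increasing, in range, and reads back the table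
theorem pvF_spec (vs : List String) :
    (pvF vs).Pairwise (· < ·) ∧ (∀ j ∈ pvF vs, 0 ≤ j ∧ j < (vs.length : Int)) ∧
      (pvF vs).map (fun j => PySem.List.pyGetD vs j "") = pvT vs := by
  induction vs using List.reverseRecOn with
  | nil => refine ⟨by simp [pvF, pvFI, PySem.Set.ofList, PySem.Set.empty], by simp [pvF, pvFI, PySem.Set.ofList, PySem.Set.empty], by simp [pvF, pvFI, pvT, PySem.Set.ofList, PySem.Set.empty]⟩
  | append_singleton vs x ih =>
    obtain ⟨hpw, hbd, hmap⟩ := ih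
    by_cases hx : x ∈ vs
    · -- x seen before: nothing changes
      have hF : pvF (vs ++ [x]) = pvF vs := by
        unfold pvF
        rw [pvFI_append, pv_ofList_append_singleton]
        simp only [hx, if_true]
        apply PySem.Set.add_of_mem
        rw [PySem.Set.mem_ofList]
        unfold pvFI
        exact List.mem_map.mpr ⟨x, hx, rfl⟩
      have hT : pvT (vs ++ [x]) = pvT vs := by
        unfold pvT
        rw [pv_ofList_append_singleton]
        exact PySem.Set.add_of_mem (by rw [PySem.Set.mem_ofList]; exact hx)
      refine ⟨hF ▸ hpw, ?_, ?_⟩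
      · intro j hj
        rw [hF] at hj
        obtain ⟨h0, h1⟩ := hbd j hj
        have hl : ((vs ++ [x]).length : Int) = (vs.length : Int) + 1 := by
          simp
        exact ⟨h0, by omega⟩
      · rw [hF, hT, ← hmap]
        exact List.map_congr_left (fun j hj => by
          obtain ⟨h0, h1⟩ := hbd j hj
          rw [PySem.List.pyGetD_eq_getElem _ _ h0 (by simp; omega),
              PySem.List.pyGetD_eq_getElem _ _ h0 (by exact_mod_cast h1),
              List.getElem_append_left]
          )
    · -- new string: position vs.length is appended to pvF, x to the table
      have hnew : ((vs.length : Nat) : Int) ∉ pvF vs := by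
        intro hmem
        exact absurd (hbd _ hmem).2 (by simp)
      have hF : pvF (vs ++ [x]) = pvF vs ++ [((vs.length : Nat) : Int)] := by
        unfold pvF
        rw [pvFI_append, pv_ofList_append_singleton]
        simp only [hx, if_false]
        exact PySem.Set.add_of_not_mem hnew
      have hT : pvT (vs ++ [x]) = pvT vs ++ [x] := by
        unfold pvT
        rw [pv_ofList_append_singleton]
        exact PySem.Set.add_of_not_mem (by rw [PySem.Set.mem_ofList]; exact hx)
      refine ⟨?_, ?_, ?_⟩
      · rw [hF]
        rw [List.pairwise_append]
        refine ⟨hpw, by simp, ?_⟩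
        intro a ha b hb
        simp at hb; subst hb
        exact (hbd a ha).2
      · intro j hj
        rw [hF] at hj
        rcases List.mem_append.mp hj with h | h
        · obtain ⟨h0, h1⟩ := hbd j h
          have hl : ((vs ++ [x]).length : Int) = (vs.length : Int) + 1 := by simp
          exact ⟨h0, by omega⟩
        · simp only [List.mem_cons, List.not_mem_nil, or_false] at h
          subst h
          have hl : ((vs ++ [x]).length : Int) = (vs.length : Int) + 1 := by simp
          exact ⟨by positivity, by omega⟩
      · rw [hF, hT, List.map_append, ← hmap]
        congr 1
        · exact List.map_congr_left (fun j hj => by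
            obtain ⟨h0, h1⟩ := hbd j hj
            rw [PySem.List.pyGetD_eq_getElem _ _ h0 (by simp; omega),
                PySem.List.pyGetD_eq_getElem _ _ h0 (by exact_mod_cast h1),
                List.getElem_append_left]
            )
        · simp only [List.map_cons, List.map_nil]
          congr 1
          rw [PySem.List.pyGetD_eq_getElem _ _ (by positivity) (by simp)]
          simp

-- position of an image under an injective-on-the-list map
theorem pv_idxOf_map {α β : Type} [DecidableEq α] [DecidableEq β] (l : List α) (g : α → β)
    (hnd : (l.map g).Nodup) (j : α) (hj : j ∈ l) : (l.map g).idxOf (g j) = l.idxOf j := by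
  induction l with
  | nil => simp at hj
  | cons a t ih =>
    simp only [List.map_cons]
    by_cases hja : j = a
    · subst hja; simp [List.idxOf_cons_self]
    · have hjt : j ∈ t := by simpa [hja] using hj
      have hgne : g j ≠ g a := by
        intro he
        have : g j ∈ t.map g := List.mem_map.mpr ⟨j, hjt, rfl⟩
        rw [he] at this
        exact (List.nodup_cons.mp hnd).1 this
      rw [List.idxOf_cons_ne _ (Ne.symm hgne), List.idxOf_cons_ne _ (Ne.symm hja)]
      rw [ih (List.nodup_cons.mp hnd).2 hjt]

-- enumerate over an extended list
theorem pv_enumerate_append_singleton {α : Type} (xs : List α) (x : α) (s : Int) :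
    PySem.List.enumerate (xs ++ [x]) s = PySem.List.enumerate xs s ++ [(s + xs.length, x)] := by
  induction xs generalizing s with
  | nil => simp
  | cons a t ih =>
    rw [List.cons_append, PySem.List.enumerate_cons, PySem.List.enumerate_cons, ih]
    simp [List.cons_append]
    omega

-- the rank-filling loop writes each position's rank
theorem pvRank_spec (fs : List Int) (n : Nat) (hnd : fs.Nodup)
    (hbd : ∀ j ∈ fs, 0 ≤ j ∧ j < (n : Int)) (init : List Int) (hlen : init.length = n) :
    ((PySem.List.enumerate fs).foldl pvRankStep init).length = n ∧
      ∀ j ∈ fs, PySem.List.pyGetD ((PySem.List.enumerate fs).foldl pvRankStep init) j 0 =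
        ((fs.idxOf j : Nat) : Int) := by
  induction fs using List.reverseRecOn with
  | nil => exact ⟨by simpa [PySem.List.enumerate] using hlen, by simp⟩
  | append_singleton fs j ih =>
    obtain ⟨hfs_nd, hdisj⟩ : fs.Nodup ∧ j ∉ fs := by
      have h := List.nodup_append.mp hnd
      exact ⟨h.1, fun hj => h.2.2 j hj j (by simp) rfl⟩
    have hbd' : ∀ j' ∈ fs, 0 ≤ j' ∧ j' < (n : Int) := fun j' hj' => hbd j' (by simp [hj'])
    obtain ⟨hj0, hjn⟩ := hbd j (by simp)
    obtain ⟨ihlen, ihread⟩ := ih hfs_nd hbd'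
    have hfold : (PySem.List.enumerate (fs ++ [j])).foldl pvRankStep init =
        ((PySem.List.enumerate fs).foldl pvRankStep init).set j.toNat (0 + (fs.length : Int)) := by
      rw [pv_enumerate_append_singleton, List.foldl_append]
      simp only [List.foldl_cons, List.foldl_nil, pvRankStep]
      rw [PySem.List.pySetD_of_nonneg _ _ hj0]
    have hL : (((PySem.List.enumerate fs).foldl pvRankStep init).set j.toNat
        (0 + (fs.length : Int))).length = n := by
      simp only [List.length_set]; exact ihlen
    refine ⟨by rw [hfold, hL], ?_⟩
    intro j' hj'
    rcases List.mem_append.mp hj' with h | h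
    · have hne : j' ≠ j := fun he => hdisj (he ▸ h)
      obtain ⟨hj'0, hj'n⟩ := hbd' j' h
      have hlt : j'.toNat < (((PySem.List.enumerate fs).foldl pvRankStep init).set j.toNat
          (0 + (fs.length : Int))).length := by rw [hL]; omega
      rw [hfold, PySem.List.pyGetD_eq_getElem _ _ hj'0 (by rw [hL]; exact_mod_cast hj'n),
          List.getElem_set_ne (by omega) hlt,
          ← PySem.List.pyGetD_eq_getElem _ _ hj'0 (by rw [ihlen]; exact_mod_cast hj'n),
          ihread j' h, List.idxOf_append_of_mem h]
    · simp only [List.mem_cons, List.not_mem_nil, or_false] at h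
      subst h
      have hlt : j'.toNat < (((PySem.List.enumerate fs).foldl pvRankStep init).set j'.toNat
          (0 + (fs.length : Int))).length := by rw [hL]; omega
      rw [hfold, PySem.List.pyGetD_eq_getElem _ _ hj0 (by rw [hL]; exact_mod_cast hjn),
          List.getElem_set_self hlt, List.idxOf_append, if_neg hdisj]
      simp

-- the running set only ever grows by appending
theorem pv_foldl_add_prefix {α : Type} [BEq α] [LawfulBEq α] (l : List α) (t : List α) :
    ∃ ext, l.foldl PySem.Set.add t = t ++ ext := by
  induction l generalizing t with
  | nil => exact ⟨[], by simp⟩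
  | cons a l ih =>
    rw [List.foldl_cons, PySem.Set.add_eq_ite]
    by_cases ha : a ∈ t
    · rw [if_pos ha]; exact ih t
    · rw [if_neg ha]
      obtain ⟨e, he⟩ := ih (t ++ [a])
      exact ⟨a :: e, by simp [he]⟩

-- A's loop: the table is the running set, the dict maps each table entry to its position,
-- and each recorded index is the position of the element in the FINAL table
theorem pvA_loop (l : List String) (t : List String) (d : PySem.Dict String Int) (idx : List Int)
    (hnd : t.Nodup)
    (hd : ∀ s, d.get? s = if s ∈ t then some ((t.idxOf s : Nat) : Int) else none) :
    ∃ d', l.foldl pvAStepN (t, d, idx) =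
      (l.foldl PySem.Set.add t, d',
        idx ++ l.map (fun s => (((l.foldl PySem.Set.add t).idxOf s : Nat) : Int))) := by
  induction l generalizing t d idx with
  | nil => exact ⟨d, by simp⟩
  | cons s tl ih =>
    have hcont : d.contains s = decide (s ∈ t) := by
      rw [PySem.Dict.contains_eq_isSome_get?, hd s]
      by_cases hs : s ∈ t <;> simp [hs]
    by_cases hs : s ∈ t
    · -- seen string: table and dict unchanged
      have hstep : pvAStepN (t, d, idx) s = (t, d, idx ++ [d.getD s 0]) := by
        unfold pvAStepN
        simp [hcont, hs]
      have hval : d.getD s 0 = ((t.idxOf s : Nat) : Int) :=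
        PySem.Dict.getD_of_get?_eq_some _ 0 (by rw [hd s, if_pos hs])
      have hadd : PySem.Set.add t s = t := PySem.Set.add_of_mem hs
      obtain ⟨d', hrec⟩ := ih t d (idx ++ [d.getD s 0]) hnd hd
      refine ⟨d', ?_⟩
      rw [List.foldl_cons, hstep, hrec, List.foldl_cons, hadd]
      obtain ⟨ext, hext⟩ := pv_foldl_add_prefix tl t
      rw [List.map_cons]
      simp only [hval, List.append_assoc, List.singleton_append]
      rw [hext, List.idxOf_append_of_mem hs]
    · -- new string: appended to the table, inserted into the dict at position t.length
      have hstep : pvAStepN (t, d, idx) s =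
          (t ++ [s], d.insert s ((t.length : Int)),
            idx ++ [(d.insert s ((t.length : Int))).getD s 0]) := by
        unfold pvAStepN
        simp [hcont, hs]
      have hval : (d.insert s ((t.length : Int))).getD s 0 = ((t.length : Nat) : Int) :=
        PySem.Dict.getD_of_get?_eq_some _ 0 (PySem.Dict.get?_insert_self _ _ _)
      have hidxs : (t ++ [s]).idxOf s = t.length := by
        rw [List.idxOf_append, if_neg hs, List.idxOf_cons_self]
        omega
      have hnd' : (t ++ [s]).Nodup := by
        rw [List.nodup_append]
        refine ⟨hnd, List.nodup_singleton s, ?_⟩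
        intro a ha b hb
        simp only [List.mem_singleton] at hb
        subst hb
        exact fun he => hs (he ▸ ha)
      have hd' : ∀ s', (d.insert s ((t.length : Int))).get? s' =
          if s' ∈ t ++ [s] then some (((t ++ [s]).idxOf s' : Nat) : Int) else none := by
        intro s'
        by_cases he : s' = s
        · subst he
          rw [PySem.Dict.get?_insert_self, if_pos (by simp), hidxs]
        · rw [PySem.Dict.get?_insert_of_ne _ _ he, hd s']
          by_cases hm : s' ∈ t
          · rw [if_pos hm, if_pos (by simp [hm]), List.idxOf_append_of_mem hm]
          · rw [if_neg hm, if_neg (by simp [hm, he])]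
      have hadd : PySem.Set.add t s = t ++ [s] := PySem.Set.add_of_not_mem hs
      obtain ⟨d', hrec⟩ := ih (t ++ [s]) _ (idx ++ [(d.insert s ((t.length : Int))).getD s 0]) hnd' hd'
      refine ⟨d', ?_⟩
      rw [List.foldl_cons, hstep, hrec, List.foldl_cons, hadd]
      obtain ⟨ext, hext⟩ := pv_foldl_add_prefix tl (t ++ [s])
      rw [List.map_cons]
      simp only [hval, List.append_assoc, List.singleton_append]
      rw [hext, List.idxOf_append_of_mem (by simp), hidxs]

-- ===== VERDICT (by name: the statement is the Claim_ definition above) =====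
theorem build_string_index_py_spec : Claim_equal_build_string_index_py := by
  intro values _
  unfold Spec_build_string_index_py
  have hnormed : values.map pvNorm = values := by
    have h := List.map_congr_left (fun v (_ : v ∈ values) => pvNorm_id v)
    simpa using h
  -- A's loop, started from the empty state
  obtain ⟨d', hA⟩ := pvA_loop values [] PySem.Dict.empty []
    List.nodup_nil (fun s => by rw [PySem.Dict.get?_empty]; simp)
  have hAfold : values.foldl pvAStep ([], PySem.Dict.empty, []) =
      (values.map pvNorm).foldl pvAStepN ([], PySem.Dict.empty, []) := by
    rw [List.foldl_map]; rfl
  rw [hnormed] at hAfold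
  -- B's passes
  obtain ⟨hpw, hbd, hmap⟩ := pvF_spec values
  have hsorted : PySem.List.sorted (PySem.Set.ofList (pvFI values)) (fun x => x) = pvF values :=
    PySem.List.sorted_eq_of_perm_of_pairwise_lt _ _ _ (List.Perm.refl _) hpw
  obtain ⟨-, hread⟩ := pvRank_spec (pvF values) values.length
    (PySem.Set.nodup_ofList _) hbd (List.replicate values.length 0) (by simp)
  -- each final index equals the position in the canonical table
  have hpoint : ∀ s ∈ values,
      PySem.List.pyGetD ((PySem.List.enumerate (pvF values)).foldl pvRankStep
        (List.replicate values.length 0)) ((values.idxOf s : Nat) : Int) 0 =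
      (((pvT values).idxOf s : Nat) : Int) := by
    intro s hs
    have hjmem : ((values.idxOf s : Nat) : Int) ∈ pvF values := by
      rw [pvF, PySem.Set.mem_ofList]
      exact List.mem_map.mpr ⟨s, hs, rfl⟩
    rw [hread _ hjmem]
    have hgnd : ((pvF values).map (fun j => PySem.List.pyGetD values j "")).Nodup := by
      rw [hmap]; exact PySem.Set.nodup_ofList values
    have hidx := pv_idxOf_map (pvF values) (fun j => PySem.List.pyGetD values j "")
      hgnd _ hjmem
    rw [hmap] at hidx
    have hglt : values.idxOf s < values.length := List.idxOf_lt_length_of_mem hs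
    have hg : PySem.List.pyGetD values ((values.idxOf s : Nat) : Int) "" = s := by
      rw [PySem.List.pyGetD_eq_getElem _ _ (by positivity) (by exact_mod_cast hglt)]
      simp [List.getElem_idxOf]
    simp only [hg] at hidx
    rw [hidx]
  simp only [build_string_index_py, build_string_index_py_alt, hnormed,
    pvFirstList_eq, hsorted, hmap, hAfold, hA]
  refine Prod.ext rfl ?_
  simp only
  unfold pvFI
  rw [List.map_map]
  exact List.map_congr_left (fun s hs => (hpoint s hs).symm)
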